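-- pv_equiv track=rewrite | github.com/jungwonkkim/swexpert | pro64062.py | solution
-- ===== SOURCE A (Python) =====
-- def solution(stones, k):
--     answer = 200000001
--     cnt = 0
--     while cnt < len(stones)-k:
--         max_val = 0
--         max_idx = -1
--         for i in range(cnt, cnt+k):
--             if max_val < stones[i]:
--                 max_val = stones[i]
--                 max_idx = i
--         if answer > max_val:
--             answer = max_val
--         cnt = max_idx+1
--     return answer
-- ===== SOURCE B (Python) =====
-- def solution(stones, k):
--     # Different algorithm: precompute next-strictly-greater indices with a
--     # monotonic stack, then follow the greedy jumps chasing those pointers.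
--     n = len(stones)
--     answer = 200000001
--     if n - k <= 0:
--         return answer
--     nxt = [n] * n
--     stack = []
--     for i in range(n):
--         while stack and stones[stack[-1]] < stones[i]:
--             nxt[stack.pop()] = i
--         stack.append(i)
--     c = 0
--     while c < n - k:
--         j = c
--         while nxt[j] < c + k:
--             j = nxt[j]
--         if stones[j] < answer:
--             answer = stones[j]
--         c = j + 1
--     return answer
-- ===== Notes on version B (the rewrite author's own statement) =====
-- stated objective: alternative
-- what changed: Instead of rescanning each jump window to find its leftmost maximum, B precomputes every index's next strictly-greater index in one monotonic-stack pass and follows the greedy jumps by chasing those pointers.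
import Mathlib
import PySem

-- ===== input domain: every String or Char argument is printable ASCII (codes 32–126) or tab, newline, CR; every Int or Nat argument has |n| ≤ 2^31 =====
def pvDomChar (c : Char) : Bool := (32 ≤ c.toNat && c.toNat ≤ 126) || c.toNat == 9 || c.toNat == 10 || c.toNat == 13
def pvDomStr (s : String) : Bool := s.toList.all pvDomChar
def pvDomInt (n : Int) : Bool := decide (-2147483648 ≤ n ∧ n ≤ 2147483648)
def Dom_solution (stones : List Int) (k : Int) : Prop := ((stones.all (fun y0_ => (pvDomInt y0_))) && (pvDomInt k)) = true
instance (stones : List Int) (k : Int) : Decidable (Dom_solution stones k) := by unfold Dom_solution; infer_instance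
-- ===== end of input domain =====

-- B computes the same answer by a different algorithm (objective: alternative):
-- a one-pass monotonic-stack "next strictly greater index" table, then pointer
-- chases along the greedy jump chain instead of A's per-jump window rescans;
-- the equivalence is about return values.

-- ===== PORT A =====
-- inner 'for i in range(cnt, cnt+k)' scan of A, state (max_val, max_idx)
def aInner (stones : List Int) (c k : Int) : Int × Int :=
  (PySem.List.pyRange c (c + k) 1).foldl
    (fun s i =>
      if s.1 < PySem.List.pyGetD stones i 0 then (PySem.List.pyGetD stones i 0, i) else s)
    (0, -1)

-- A's while loop; fuel n+1 is enough for every input admitted by Pre_solution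
def aLoop (stones : List Int) (k : Int) : Nat → Int → Int → Int
  | 0, ans, _ => ans
  | f + 1, ans, c =>
    if c < (stones.length : Int) - k then
      let p := aInner stones c k
      aLoop stones k f (if p.1 < ans then p.1 else ans) (p.2 + 1)
    else ans

def solution (stones : List Int) (k : Int) : Int :=
  aLoop stones k (stones.length + 1) 200000001 0

-- ===== PORT B =====
-- B's inner 'while stack and stones[stack[-1]] < stones[i]' pop loop
def bPop (stones : List Int) (i : Nat) : List Nat → List Nat → List Nat × List Nat
  | nxt, [] => (nxt, [])
  | nxt, t :: st =>
    if stones.getD t 0 < stones.getD i 0 then bPop stones i (nxt.set t i) st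
    else (nxt, t :: st)

-- B's 'for i in range(n)' building the next-greater table
def bNgeLoop (stones : List Int) : List Nat → List Nat × List Nat → List Nat × List Nat
  | [], s => s
  | i :: is, (nxt, st) =>
    let p := bPop stones i nxt st
    bNgeLoop stones is (p.1, i :: p.2)

def bNext (stones : List Int) : List Nat :=
  (bNgeLoop stones (List.range stones.length)
    (List.replicate stones.length stones.length, [])).1

-- B's inner 'while nxt[j] < c + k' pointer chase; fuel n is enough under Pre_solution
def bChase (nxt : List Nat) (hi : Int) : Nat → Nat → Nat
  | 0, j => j
  | f + 1, j =>
    if ((nxt.getD j 0 : Nat) : Int) < hi then bChase nxt hi f (nxt.getD j 0) else j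

-- B's outer 'while c < n - k' loop
def bLoop (stones : List Int) (k : Int) (nxt : List Nat) : Nat → Int → Int → Int
  | 0, ans, _ => ans
  | f + 1, ans, c =>
    if c < (stones.length : Int) - k then
      let j := bChase nxt (c + k) stones.length c.toNat
      bLoop stones k nxt f (if stones.getD j 0 < ans then stones.getD j 0 else ans) ((j : Int) + 1)
    else ans

def solution_alt (stones : List Int) (k : Int) : Int :=
  if (stones.length : Int) - k ≤ 0 then 200000001
  else bLoop stones k (bNext stones) (stones.length + 1) 200000001 0

-- ===== PRECONDITION & SPEC =====
-- Pre_ excludes exactly the inputs on which A never returns (its while-loop cycles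
-- forever): k ≤ 0 (except the trivial stones = [], k = 0 case, where A returns), or
-- some length-k window starting at c < n-k contains no positive stone, so A resets
-- cnt to max_idx+1 = 0 forever.  On every excluded input A diverges.
def Pre_solution (stones : List Int) (k : Int) : Prop :=
  (stones = [] ∧ k = 0) ∨
  (1 ≤ k ∧ ∀ c ∈ List.range stones.length, (c : Int) < (stones.length : Int) - k →
      ∃ i ∈ List.range stones.length, c ≤ i ∧ (i : Int) < (c : Int) + k ∧ 0 < stones.getD i 0)
instance (stones : List Int) (k : Int) : Decidable (Pre_solution stones k) := by
  unfold Pre_solution; infer_instance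

def pvWitness_solution : List Int × Int := ([3, 1, 2, 4, 1], 2)

def Spec_solution (stones : List Int) (k : Int) (out : Int) : Prop := out = solution_alt stones k
instance (stones : List Int) (k : Int) (out : Int) : Decidable (Spec_solution stones k out) := by unfold Spec_solution; infer_instance

-- ===== CLAIM (what is proved, stated in full; the proofs are below) =====
def Claim_equal_solution : Prop := ∀ (stones : List Int) (k : Int), Dom_solution stones k → Pre_solution stones k → Spec_solution stones k (solution stones k)

-- ===== LEMMAS AND PROOFS =====

-- value of the stone at (Nat) index i
def EV (stones : List Int) (i : Nat) : Int := stones.getD i 0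

-- 'j is the leftmost argmax of the window [c, c+K)'
def IsLAM (stones : List Int) (c K j : Nat) : Prop :=
  c ≤ j ∧ j < c + K ∧
  (∀ i : Nat, c ≤ i → i < j → EV stones i < EV stones j) ∧
  (∀ i : Nat, j < i → i < c + K → EV stones i ≤ EV stones j)

theorem IsLAM_unique {stones : List Int} {c K j j' : Nat}
    (h : IsLAM stones c K j) (h' : IsLAM stones c K j') : j = j' := by
  obtain ⟨hc, hk, hl, hr⟩ := h
  obtain ⟨hc', hk', hl', hr'⟩ := h'
  rcases Nat.lt_trichotomy j j' with hlt | he | hgt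
  · have h1 := hl' j hc hlt
    have h2 := hr j' hlt hk'
    omega
  · exact he
  · have h1 := hl j' hc' hgt
    have h2 := hr' j hgt hk
    omega

-- running characterisation of A's inner scan, by induction on the window length
theorem aInner_aux (stones : List Int) (c : Nat) : ∀ m : Nat,
    (aInner stones (c : Int) (m : Int) = (0, -1) ∧
      ∀ i : Nat, c ≤ i → i < c + m → EV stones i ≤ 0) ∨
    (∃ j : Nat, c ≤ j ∧ j < c + m ∧
      aInner stones (c : Int) (m : Int) = (EV stones j, (j : Int)) ∧ 0 < EV stones j ∧
      (∀ i : Nat, c ≤ i → i < j → EV stones i < EV stones j) ∧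
      (∀ i : Nat, j < i → i < c + m → EV stones i ≤ EV stones j)) := by
  intro m
  induction m with
  | zero =>
    left
    constructor
    · rw [aInner, Int.natCast_zero, add_zero, PySem.List.pyRange_one_eq_nil le_rfl]
      rfl
    · omega
  | succ m ih =>
    have hsplit : PySem.List.pyRange (c : Int) ((c : Int) + ((m : Nat) + 1 : Nat)) 1
        = PySem.List.pyRange (c : Int) ((c : Int) + (m : Int)) 1 ++ [((c + m : Nat) : Int)] := by
      push_cast
      rw [show (c : Int) + ((m : Int) + 1) = ((c : Int) + (m : Int)) + 1 by ring]
      exact PySem.List.pyRange_one_succ_right (by omega)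
    have hget : PySem.List.pyGetD stones ((c + m : Nat) : Int) 0 = EV stones (c + m) := by
      rw [PySem.List.pyGetD_natCast]; rfl
    have hrw : aInner stones (c : Int) ((m + 1 : Nat) : Int) =
        (if (aInner stones (c : Int) (m : Int)).1 < EV stones (c + m)
          then (EV stones (c + m), ((c + m : Nat) : Int))
          else aInner stones (c : Int) (m : Int)) := by
      rw [aInner, hsplit, List.foldl_append, List.foldl_cons, List.foldl_nil, hget]
      rfl
    rw [hrw]
    rcases ih with ⟨heq, hall⟩ | ⟨j, hcj, hjm, heq, hpos, hleft, hright⟩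
    · rw [heq]
      by_cases h : (0 : Int) < EV stones (c + m)
      · right
        refine ⟨c + m, by omega, by omega, by rw [if_pos h], h, ?_, by omega⟩
        intro i hci him
        have := hall i hci (by omega)
        omega
      · left
        rw [if_neg h]
        refine ⟨rfl, fun i hci him => ?_⟩
        rcases Nat.lt_or_ge i (c + m) with h' | h'
        · exact hall i hci h'
        · have hieq : i = c + m := by omega
          subst hieq; omega
    · rw [heq]
      by_cases h : EV stones j < EV stones (c + m)
      · right
        refine ⟨c + m, by omega, by omega, by rw [if_pos h], by omega, ?_, by omega⟩
        intro i hci him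
        rcases Nat.lt_trichotomy i j with h' | h' | h'
        · have := hleft i hci h'; omega
        · subst h'; exact h
        · have := hright i h' (by omega); omega
      · right
        rw [if_neg h]
        refine ⟨j, hcj, by omega, rfl, hpos, hleft, fun i hji him => ?_⟩
        rcases Nat.lt_or_ge i (c + m) with h' | h'
        · exact hright i hji h'
        · have hieq : i = c + m := by omega
          subst hieq; omega

-- on a window containing a positive stone, A's scan returns the leftmost argmax
theorem aInner_spec (stones : List Int) (c K : Nat)
    (hpos : ∃ i : Nat, c ≤ i ∧ i < c + K ∧ 0 < EV stones i) :
    ∃ j : Nat, IsLAM stones c K j ∧ 0 < EV stones j ∧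
      aInner stones (c : Int) (K : Int) = (EV stones j, (j : Int)) := by
  rcases aInner_aux stones c K with ⟨heq, hall⟩ | ⟨j, h1, h2, h3, h4, h5, h6⟩
  · obtain ⟨i, hi1, hi2, hi3⟩ := hpos
    have := hall i hi1 hi2
    omega
  · exact ⟨j, ⟨h1, h2, h5, h6⟩, h4, h3⟩

-- the specification B's next-greater table satisfies once built
def NextSpec (stones : List Int) (nxt : List Nat) : Prop :=
  nxt.length = stones.length ∧
  ∀ t : Nat, t < stones.length →
    t < nxt.getD t 0 ∧ nxt.getD t 0 ≤ stones.length ∧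
    (∀ u : Nat, t < u → u < nxt.getD t 0 → EV stones u ≤ EV stones t) ∧
    (nxt.getD t 0 < stones.length → EV stones t < EV stones (nxt.getD t 0))

-- loop invariant of B's monotonic-stack pass after processing indices [0, i)
def LInv (stones : List Int) (i : Nat) (nxt : List Nat) (st : List Nat) : Prop :=
  nxt.length = stones.length ∧
  st.Pairwise (· > ·) ∧
  (∀ t ∈ st, t < i) ∧
  (∀ t ∈ st, ∀ u : Nat, t < u → u < i → EV stones u ≤ EV stones t) ∧
  (∀ t : Nat, t < i → t ∉ st → ∃ u : Nat, t < u ∧ u < i ∧ EV stones t < EV stones u) ∧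
  (∀ t ∈ st, nxt.getD t 0 = stones.length) ∧
  (∀ t : Nat, i ≤ t → t < stones.length → nxt.getD t 0 = stones.length) ∧
  (∀ t : Nat, t < i → t ∉ st →
    t < nxt.getD t 0 ∧ nxt.getD t 0 ≤ i ∧ EV stones t < EV stones (nxt.getD t 0) ∧
    ∀ u : Nat, t < u → u < nxt.getD t 0 → EV stones u ≤ EV stones t)

theorem getD_set_ne (l : List Nat) (a t t' : Nat) (h : t ≠ t') :
    (l.set t a).getD t' 0 = l.getD t' 0 := by
  simp [List.getD_eq_getElem?_getD, List.getElem?_set_ne h]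

theorem bPop_spec (stones : List Int) (i : Nat) (hi : i < stones.length) :
    ∀ (st nxt : List Nat),
      nxt.length = stones.length →
      st.Pairwise (· > ·) →
      (∀ t ∈ st, t < i) →
      (∀ t ∈ st, ∀ u : Nat, t < u → u < i → EV stones u ≤ EV stones t) →
      (∀ t ∈ st, nxt.getD t 0 = stones.length) →
      (∀ t : Nat, i ≤ t → t < stones.length → nxt.getD t 0 = stones.length) →
      (∀ t : Nat, t < i → t ∉ st →
        t < nxt.getD t 0 ∧ nxt.getD t 0 ≤ i ∧ EV stones t < EV stones (nxt.getD t 0) ∧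
        ∀ u : Nat, t < u → u < nxt.getD t 0 → EV stones u ≤ EV stones t) →
      (bPop stones i nxt st).1.length = stones.length ∧
      (bPop stones i nxt st).2.Pairwise (· > ·) ∧
      (bPop stones i nxt st).2 ⊆ st ∧
      (∀ t ∈ (bPop stones i nxt st).2, EV stones i ≤ EV stones t) ∧
      (∀ t ∈ st, t ∉ (bPop stones i nxt st).2 → EV stones t < EV stones i) ∧
      (∀ t ∈ (bPop stones i nxt st).2, (bPop stones i nxt st).1.getD t 0 = stones.length) ∧
      (∀ t : Nat, i ≤ t → t < stones.length → (bPop stones i nxt st).1.getD t 0 = stones.length) ∧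
      (∀ t : Nat, t < i → t ∉ (bPop stones i nxt st).2 →
        t < (bPop stones i nxt st).1.getD t 0 ∧ (bPop stones i nxt st).1.getD t 0 ≤ i ∧
        EV stones t < EV stones ((bPop stones i nxt st).1.getD t 0) ∧
        ∀ u : Nat, t < u → u < (bPop stones i nxt st).1.getD t 0 → EV stones u ≤ EV stones t) := by
  intro st
  induction st with
  | nil =>
    intro nxt h1 h2 h3 h4 h6 h7 h8
    simp only [bPop]
    refine ⟨h1, h2, fun x hx => hx, by simp, by simp, by simp, h7, ?_⟩
    intro t ht _
    exact h8 t ht (List.not_mem_nil)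
  | cons t st ih =>
    intro nxt h1 h2 h3 h4 h6 h7 h8
    have hgt : ∀ t' ∈ st, t' < t := fun t' ht' => (List.pairwise_cons.mp h2).1 t' ht'
    by_cases hcmp : stones.getD t 0 < stones.getD i 0
    · -- head popped
      have hbp : bPop stones i nxt (t :: st) = bPop stones i (nxt.set t i) st := by
        simp only [bPop, if_pos hcmp]
      rw [hbp]
      have hti : t < i := h3 t List.mem_cons_self
      have hres := ih (nxt.set t i)
        (by simpa using h1)
        ((List.pairwise_cons.mp h2).2)
        (fun t' ht' => h3 t' (List.mem_cons_of_mem _ ht'))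
        (fun t' ht' => h4 t' (List.mem_cons_of_mem _ ht'))
        (fun t' ht' => by
          rw [getD_set_ne _ _ _ _ (Nat.ne_of_gt (hgt t' ht'))]
          exact h6 t' (List.mem_cons_of_mem _ ht'))
        (fun u hu hun => by
          rw [getD_set_ne _ _ _ _ (by omega)]
          exact h7 u hu hun)
        (fun t' ht' hmem => by
          by_cases he : t' = t
          · subst he
            have hset : (nxt.set t' i).getD t' 0 = i := by
              have hlt : t' < nxt.length := by omega
              simp [List.getD_eq_getElem?_getD, hlt]
            rw [hset]
            exact ⟨hti, le_rfl, hcmp, fun u hu hui => h4 t' List.mem_cons_self u hu hui⟩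
          · rw [getD_set_ne _ _ _ _ (fun he' => he he'.symm)]
            exact h8 t' ht' (by simp [he, hmem]))
      obtain ⟨c1, c2, c3, c4, c5, c6, c7, c8⟩ := hres
      refine ⟨c1, c2, fun x hx => List.mem_cons_of_mem _ (c3 hx), c4, ?_, c6, c7, c8⟩
      intro t' ht' hnm
      rcases List.mem_cons.mp ht' with he | hm
      · subst he; exact hcmp
      · exact c5 t' hm hnm
    · -- head kept, stop
      have hbp : bPop stones i nxt (t :: st) = (nxt, t :: st) := by
        simp only [bPop, if_neg hcmp]
      rw [hbp]
      have hEi : EV stones i ≤ EV stones t := not_lt.mp hcmp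
      refine ⟨h1, h2, fun x hx => hx, ?_, fun t' ht' hnm => absurd ht' hnm, h6, h7,
        fun t' ht' hnm => h8 t' ht' hnm⟩
      intro t' ht'
      rcases List.mem_cons.mp ht' with he | hm
      · subst he; exact hEi
      · have htt' : t' < t := hgt t' hm
        have := h4 t' (List.mem_cons_of_mem _ hm) t htt' (h3 t List.mem_cons_self)
        exact le_trans hEi this

theorem step_inv (stones : List Int) (i : Nat) (hi : i < stones.length)
    (nxt st : List Nat) (h : LInv stones i nxt st) :
    LInv stones (i + 1) (bPop stones i nxt st).1 (i :: (bPop stones i nxt st).2) := by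
  obtain ⟨h1, h2, h3, h4, h5, h6, h7, h8⟩ := h
  obtain ⟨c1, c2, c3, c4, c5, c6, c7, c8⟩ := bPop_spec stones i hi st nxt h1 h2 h3 h4 h6 h7 h8
  refine ⟨c1, ?_, ?_, ?_, ?_, ?_, ?_, ?_⟩
  · exact List.pairwise_cons.mpr ⟨fun t' ht' => h3 t' (c3 ht'), c2⟩
  · intro t ht
    rcases List.mem_cons.mp ht with he | hm
    · omega
    · have := h3 t (c3 hm); omega
  · intro t ht u hu hui
    rcases List.mem_cons.mp ht with he | hm
    · omega
    · rcases Nat.lt_or_ge u i with h' | h'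
      · exact h4 t (c3 hm) u hu h'
      · have hue : u = i := by omega
        subst hue
        exact c4 t hm
  · intro t ht hnm
    have hti : t ≠ i := fun he => hnm (he ▸ List.mem_cons_self)
    have hti' : t < i := by omega
    have hnm' : t ∉ (bPop stones i nxt st).2 := fun hm => hnm (List.mem_cons_of_mem _ hm)
    by_cases hin : t ∈ st
    · exact ⟨i, hti', by omega, c5 t hin hnm'⟩
    · obtain ⟨u, hu1, hu2, hu3⟩ := h5 t hti' hin
      exact ⟨u, hu1, by omega, hu3⟩
  · intro t ht
    rcases List.mem_cons.mp ht with he | hm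
    · subst he; exact c7 t le_rfl hi
    · exact c6 t hm
  · intro t ht htn
    exact c7 t (by omega) htn
  · intro t ht hnm
    have hti : t ≠ i := fun he => hnm (he ▸ List.mem_cons_self)
    have hti' : t < i := by omega
    have hnm' : t ∉ (bPop stones i nxt st).2 := fun hm => hnm (List.mem_cons_of_mem _ hm)
    obtain ⟨d1, d2, d3, d4⟩ := c8 t hti' hnm'
    exact ⟨d1, by omega, d3, d4⟩

theorem ngeLoop_inv (stones : List Int) :
    ∀ (m i : Nat) (nxt st : List Nat), i + m = stones.length → LInv stones i nxt st →
      LInv stones stones.length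
        (bNgeLoop stones (List.range' i m) (nxt, st)).1
        (bNgeLoop stones (List.range' i m) (nxt, st)).2 := by
  intro m
  induction m with
  | zero =>
    intro i nxt st he h
    simp only [List.range'_zero, bNgeLoop]
    have : i = stones.length := by omega
    exact this ▸ h
  | succ m ih =>
    intro i nxt st he h
    rw [List.range'_succ]
    simp only [bNgeLoop]
    exact ih (i + 1) _ _ (by omega) (step_inv stones i (by omega) nxt st h)

theorem bNext_spec (stones : List Int) : NextSpec stones (bNext stones) := by
  have h0 : LInv stones 0 (List.replicate stones.length stones.length) [] := by
    refine ⟨by simp, List.Pairwise.nil, by simp, by simp, by omega, by simp, ?_, by omega⟩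
    intro t _ htn
    simp [List.getD_eq_getElem?_getD, htn]
  have h := ngeLoop_inv stones stones.length 0 _ _ (by omega) h0
  rw [← List.range_eq_range'] at h
  obtain ⟨h1, h2, h3, h4, h5, h6, h7, h8⟩ := h
  refine ⟨h1, ?_⟩
  intro t htn
  by_cases hm : t ∈ (bNgeLoop stones (List.range stones.length)
      (List.replicate stones.length stones.length, [])).2
  · have he := h6 t hm
    rw [bNext, he]
    exact ⟨htn, le_rfl, fun u hu hun => h4 t hm u hu hun, by omega⟩
  · obtain ⟨d1, d2, d3, d4⟩ := h8 t htn hm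
    exact ⟨d1, d2, fun u hu hun => d4 u hu hun, fun _ => d3⟩

-- the pointer chase lands on the leftmost argmax of the window
theorem bChase_spec (stones : List Int) (nxt : List Nat) (hN : NextSpec stones nxt)
    (c K : Nat) (hn : c + K ≤ stones.length) :
    ∀ (fuel j : Nat), c ≤ j → j < c + K →
      (∀ i : Nat, c ≤ i → i < j → EV stones i < EV stones j) →
      c + K - j ≤ fuel →
      IsLAM stones c K (bChase nxt ((c + K : Nat) : Int) fuel j) := by
  intro fuel
  induction fuel with
  | zero => intro j h1 h2 _ h4; omega
  | succ f ih =>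
    intro j h1 h2 h3 h4
    obtain ⟨s1, s2, s3, s4⟩ := hN.2 j (by omega)
    simp only [bChase]
    by_cases hx : ((nxt.getD j 0 : Nat) : Int) < ((c + K : Nat) : Int)
    · rw [if_pos hx]
      have hxn : nxt.getD j 0 < c + K := by exact_mod_cast hx
      refine ih (nxt.getD j 0) (by omega) hxn ?_ (by omega)
      intro i hci hix
      have hjx : EV stones j < EV stones (nxt.getD j 0) := s4 (by omega)
      rcases Nat.lt_trichotomy i j with h' | h' | h'
      · exact lt_trans (h3 i hci h') hjx
      · subst h'; exact hjx
      · exact lt_of_le_of_lt (s3 i h' hix) hjx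
    · rw [if_neg hx]
      have hxn : c + K ≤ nxt.getD j 0 := by
        by_contra hc
        exact hx (by exact_mod_cast Nat.lt_of_not_le hc)
      exact ⟨h1, h2, h3, fun i hji hik => s3 i hji (by omega)⟩

-- the two outer loops agree step for step
theorem loops_eq (stones : List Int) (k : Int) (hk : 1 ≤ k)
    (hwin : ∀ c ∈ List.range stones.length, (c : Int) < (stones.length : Int) - k →
      ∃ i ∈ List.range stones.length, c ≤ i ∧ (i : Int) < (c : Int) + k ∧ 0 < stones.getD i 0) :
    ∀ (fuel : Nat) (ans : Int) (c : Nat),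
      aLoop stones k fuel ans (c : Int) = bLoop stones k (bNext stones) fuel ans (c : Int) := by
  intro fuel
  induction fuel with
  | zero => intro ans c; rfl
  | succ f ih =>
    intro ans c
    simp only [aLoop, bLoop]
    by_cases hc : (c : Int) < (stones.length : Int) - k
    · rw [if_pos hc, if_pos hc]
      set K := k.toNat with hKdef
      have hkK : (K : Int) = k := Int.toNat_of_nonneg (by omega)
      have hck : c + K ≤ stones.length := by omega
      have hcn : c < stones.length := by omega
      obtain ⟨i, _, hi1, hi2, hi3⟩ := hwin c (List.mem_range.mpr hcn) hc
      have hpos : ∃ i : Nat, c ≤ i ∧ i < c + K ∧ 0 < EV stones i :=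
        ⟨i, hi1, by omega, hi3⟩
      obtain ⟨j, hLAM, hjpos, hEq⟩ := aInner_spec stones c K hpos
      have hEq' : aInner stones (c : Int) k = (EV stones j, (j : Int)) := by
        rw [← hkK]; exact hEq
      have hchase : IsLAM stones c K
          (bChase (bNext stones) ((c + K : Nat) : Int) stones.length ((c : Int)).toNat) := by
        rw [Int.toNat_natCast]
        exact bChase_spec stones (bNext stones) (bNext_spec stones) c K hck
          stones.length c le_rfl (by omega) (by omega) (by omega)
      have hhi : ((c : Int) + k) = ((c + K : Nat) : Int) := by push_cast; omega
      rw [hEq', hhi]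
      have hje := IsLAM_unique hLAM hchase
      rw [← hje]
      have hgd : stones.getD j 0 = EV stones j := rfl
      rw [hgd]
      have hc1 : ((j : Int) + 1) = ((j + 1 : Nat) : Int) := by push_cast; ring
      rw [hc1]
      exact ih _ (j + 1)
    · rw [if_neg hc, if_neg hc]

-- ===== VERDICT (by name: the statement is the Claim_ definition above) =====
theorem solution_spec : Claim_equal_solution := by
  intro stones k _ hpre
  unfold Spec_solution solution solution_alt
  rcases hpre with ⟨hnil, hk0⟩ | ⟨hk, hwin⟩
  · subst hnil; subst hk0; rfl
  · by_cases hle : (stones.length : Int) - k ≤ 0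
    · rw [if_pos hle]
      have hno : ¬ ((0 : Int) < (stones.length : Int) - k) := by omega
      simp only [aLoop, if_neg hno]
    · rw [if_neg hle]
      exact_mod_cast loops_eq stones k hk hwin (stones.length + 1) 200000001 0
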